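-- pv_equiv track=rewrite | github.com/data-integration-toolkit/ditk | extraction/named_entity/multi_ner/m_ner.py | _read_data_from_list
-- ===== SOURCE A (Python) =====
-- def _read_data_from_list(data_list):
--     lines = []
--     words = []
--     labels = []
--     for i in range(len(data_list)):
--         if len(data_list[i]) == 0:
--             if len(words) and words[-1] == '.':
--                 l = ' '.join([label for label in labels if len(label) > 0])
--                 w = ' '.join([word for word in words if len(word) > 0])
--                 lines.append([l, w])
--                 words = []
--                 labels = []
--             continue
--         if data_list[i][0].startswith("-DOCSTART-"):
--             words.append('')
--             continue
--         words.append(data_list[i][0])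
--         labels.append(data_list[i][-1])
--     return lines
-- ===== SOURCE B (Python) =====
-- def _read_data_from_list(data_list):
--     # First pass: cut the input into blocks at each empty item; the final
--     # still-open block is dropped (it can never be flushed).
--     blocks = []
--     cur = []
--     for item in data_list:
--         if len(item) == 0:
--             blocks.append(cur)
--             cur = []
--         else:
--             cur.append(item)
--     # Second pass: fold each block into persistent word/label buffers and
--     # flush a [labels, words] line whenever the buffer ends in '.'.
--     lines = []
--     words = []
--     labels = []
--     for block in blocks:
--         for item in block:
--             if item[0].startswith("-DOCSTART-"):
--                 words.append('')
--             else: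
--                 words.append(item[0])
--                 labels.append(item[-1])
--         if len(words) and words[-1] == '.':
--             lines.append([' '.join(label for label in labels if len(label) > 0),
--                           ' '.join(word for word in words if len(word) > 0)])
--             words = []
--             labels = []
--     return lines
-- ===== Notes on version B (the rewrite author's own statement) =====
-- stated objective: alternative
-- what changed: Replaces A's single index loop with a two-pass decomposition: first split the input into blocks at empty items (dropping the final unterminated block), then fold the blocks through persistent word/label buffers with a flush check after each block.
import Mathlib
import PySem

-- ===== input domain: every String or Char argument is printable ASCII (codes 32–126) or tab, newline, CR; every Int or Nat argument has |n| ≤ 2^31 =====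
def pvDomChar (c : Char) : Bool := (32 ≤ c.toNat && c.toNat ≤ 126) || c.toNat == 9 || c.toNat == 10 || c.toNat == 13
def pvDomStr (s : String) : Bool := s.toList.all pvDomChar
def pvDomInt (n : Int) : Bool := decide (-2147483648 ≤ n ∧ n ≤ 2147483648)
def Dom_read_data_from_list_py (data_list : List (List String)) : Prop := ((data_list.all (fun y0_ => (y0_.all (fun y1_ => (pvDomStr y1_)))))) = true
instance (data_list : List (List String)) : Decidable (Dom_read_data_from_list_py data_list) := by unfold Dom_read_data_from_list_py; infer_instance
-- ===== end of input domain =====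

-- B splits the input into blocks at the empty items first (dropping the final
-- unterminated block) and then folds the blocks through persistent buffers,
-- instead of A's single index loop; objective: alternative decomposition, same cost.

-- ===== PORT A =====
-- loop body of A's 'for i in range(len(data_list))' loop, applied to data_list[i]
def pvStepA (st : List (List String) × List String × List String) (item : List String) :
    List (List String) × List String × List String :=
  if item.length = 0 then
    if st.2.1.length ≠ 0 ∧ PySem.List.pyGet? st.2.1 (-1) = some "." then
      let l := PySem.Str.join " " (st.2.2.filter (fun label => PySem.Str.len label > 0))
      let w := PySem.Str.join " " (st.2.1.filter (fun word => PySem.Str.len word > 0))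
      (st.1 ++ [[l, w]], [], [])
    else st
  else if PySem.Str.startswith (PySem.List.pyGetD item 0 "") "-DOCSTART-" then
    (st.1, st.2.1 ++ [""], st.2.2)
  else
    (st.1, st.2.1 ++ [PySem.List.pyGetD item 0 ""], st.2.2 ++ [PySem.List.pyGetD item (-1) ""])

def read_data_from_list_py (data_list : List (List String)) : List (List String) :=
  ((PySem.List.pyRange 0 (PySem.List.len data_list) 1).foldl
    (fun st i => pvStepA st (PySem.List.pyGetD data_list i [])) ([], [], [])).1

-- ===== PORT B =====
-- first pass: cut into blocks at empty items (pending block kept in acc.2 and dropped)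
def pvSplitStep (acc : List (List (List String)) × List (List String)) (item : List String) :
    List (List (List String)) × List (List String) :=
  if item.length = 0 then (acc.1 ++ [acc.2], []) else (acc.1, acc.2 ++ [item])

-- inner token loop body of B's second pass
def pvTokStep (wl : List String × List String) (item : List String) : List String × List String :=
  if PySem.Str.startswith (PySem.List.pyGetD item 0 "") "-DOCSTART-" then (wl.1 ++ [""], wl.2)
  else (wl.1 ++ [PySem.List.pyGetD item 0 ""], wl.2 ++ [PySem.List.pyGetD item (-1) ""])

-- end-of-block flush check of B's second pass
def pvFlush (st : List (List String) × List String × List String) :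
    List (List String) × List String × List String :=
  if st.2.1.length ≠ 0 ∧ PySem.List.pyGet? st.2.1 (-1) = some "." then
    (st.1 ++ [[PySem.Str.join " " (st.2.2.filter (fun label => PySem.Str.len label > 0)),
               PySem.Str.join " " (st.2.1.filter (fun word => PySem.Str.len word > 0))]], [], [])
  else st

-- outer loop body of B's second pass: fold the block's tokens, then flush-check
def pvBlockStep (st : List (List String) × List String × List String)
    (block : List (List String)) : List (List String) × List String × List String :=
  pvFlush (st.1, block.foldl pvTokStep st.2)

def read_data_from_list_py_alt (data_list : List (List String)) : List (List String) :=
  let blocks := (data_list.foldl pvSplitStep ([], [])).1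
  (blocks.foldl pvBlockStep ([], [], [])).1

-- ===== PRECONDITION & SPEC =====
def Spec_read_data_from_list_py (data_list : List (List String)) (out : List (List String)) : Prop := out = read_data_from_list_py_alt data_list
instance (data_list : List (List String)) (out : List (List String)) : Decidable (Spec_read_data_from_list_py data_list out) := by unfold Spec_read_data_from_list_py; infer_instance

-- ===== CLAIM (what is proved, stated in full; the proofs are below) =====
def Claim_equal_read_data_from_list_py : Prop := ∀ (data_list : List (List String)), Dom_read_data_from_list_py data_list → Spec_read_data_from_list_py data_list (read_data_from_list_py data_list)

-- ===== LEMMAS AND PROOFS =====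

-- recursive formulation of B's splitter: blocks of l with pending block cur
def pvSplitc (cur : List (List String)) : List (List String) →
    List (List (List String)) × List (List String)
  | [] => ([], cur)
  | x :: xs =>
    if x.length = 0 then
      let r := pvSplitc [] xs
      (cur :: r.1, r.2)
    else pvSplitc (cur ++ [x]) xs

theorem pvSplit_foldl (l : List (List String)) :
    ∀ (bs : List (List (List String))) (c : List (List String)),
    l.foldl pvSplitStep (bs, c) = (bs ++ (pvSplitc c l).1, (pvSplitc c l).2) := by
  induction l with
  | nil => intro bs c; simp [pvSplitc]
  | cons x xs ih =>
    intro bs c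
    by_cases hx : x.length = 0
    · simp [pvSplitStep, pvSplitc, hx, ih]
    · simp [pvSplitStep, pvSplitc, hx, ih]

theorem pvStepA_empty (st : List (List String) × List String × List String) :
    pvStepA st [] = pvFlush st := by
  simp [pvStepA, pvFlush]

theorem pvStepA_tok (st : List (List String) × List String × List String)
    (item : List String) (h : ¬ item.length = 0) :
    pvStepA st item = (st.1, pvTokStep st.2 item) := by
  simp [pvStepA, pvTokStep, h]
  split <;> rfl

theorem pvMain (l : List (List String)) :
    ∀ (c : List (List String)) (st : List (List String) × List String × List String),
    (l.foldl pvStepA (st.1, c.foldl pvTokStep st.2)).1 =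
      (((pvSplitc c l).1).foldl pvBlockStep st).1 := by
  induction l with
  | nil =>
    intro c st
    simp [pvSplitc]
  | cons x xs ih =>
    intro c st
    by_cases hx : x.length = 0
    · have hx' : x = [] := List.length_eq_zero_iff.mp hx
      subst hx'
      rw [List.foldl_cons, pvStepA_empty]
      have hb : pvFlush (st.1, c.foldl pvTokStep st.2) = pvBlockStep st c := rfl
      rw [hb]
      have := ih [] (pvBlockStep st c)
      simpa [pvSplitc] using this
    · rw [List.foldl_cons, pvStepA_tok _ _ hx]
      have : pvTokStep (c.foldl pvTokStep st.2) x = (c ++ [x]).foldl pvTokStep st.2 := by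
        simp
      rw [this]
      have := ih (c ++ [x]) st
      simpa [pvSplitc, hx] using this

-- ===== VERDICT (by name: the statement is the Claim_ definition above) =====
theorem read_data_from_list_py_spec : Claim_equal_read_data_from_list_py := by
  intro data_list _
  unfold Spec_read_data_from_list_py read_data_from_list_py read_data_from_list_py_alt
  rw [PySem.List.foldl_pyRange_zero_pyGetD, pvSplit_foldl]
  simpa using pvMain data_list [] ([], [], [])
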